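-- pv_equiv track=rewrite | github.com/Judongsung/algorithm | 백준/Silver/19941. 햄버거 분배/햄버거 분배.py | allocate_max_burger
-- ===== SOURCE A (Python) =====
-- from collections import deque
--
-- BURGER = 'H'
--
-- PEOPLE = 'P'
--
-- def allocate_max_burger(table: list, k: int) -> int:
--     result = 0
--     burgerq = deque()
--     peopleq = deque()
--
--     for i, e in enumerate(table):
--         if e == BURGER:
--             while peopleq and peopleq[0] < i-k:
--                 peopleq.popleft()
--             if peopleq:
--                 peopleq.popleft()
--                 result += 1
--             else:
--                 burgerq.append(i)
--         elif e == PEOPLE: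
--             while burgerq and burgerq[0] < i-k:
--                 burgerq.popleft()
--             if burgerq:
--                 burgerq.popleft()
--                 result += 1
--             else:
--                 peopleq.append(i)
--
--     return result
-- ===== SOURCE B (Python) =====
-- def allocate_max_burger(table: list, k: int) -> int:
--     hs = [i for i, e in enumerate(table) if e == 'H']
--     ps = [i for i, e in enumerate(table) if e == 'P']
--     res = 0
--     h = p = 0
--     while h < len(hs) and p < len(ps):
--         if abs(hs[h] - ps[p]) <= k:
--             res += 1
--             h += 1
--             p += 1
--         elif hs[h] < ps[p]:
--             h += 1
--         else:
--             p += 1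
--     return res
-- ===== Notes on version B (the rewrite author's own statement) =====
-- stated objective: alternative
-- what changed: Replaces A's single streaming pass with two lazily-pruned deques by extracting the burger and person index lists once and running a classic two-pointer merge that matches or discards the smaller head.
import Mathlib
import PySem

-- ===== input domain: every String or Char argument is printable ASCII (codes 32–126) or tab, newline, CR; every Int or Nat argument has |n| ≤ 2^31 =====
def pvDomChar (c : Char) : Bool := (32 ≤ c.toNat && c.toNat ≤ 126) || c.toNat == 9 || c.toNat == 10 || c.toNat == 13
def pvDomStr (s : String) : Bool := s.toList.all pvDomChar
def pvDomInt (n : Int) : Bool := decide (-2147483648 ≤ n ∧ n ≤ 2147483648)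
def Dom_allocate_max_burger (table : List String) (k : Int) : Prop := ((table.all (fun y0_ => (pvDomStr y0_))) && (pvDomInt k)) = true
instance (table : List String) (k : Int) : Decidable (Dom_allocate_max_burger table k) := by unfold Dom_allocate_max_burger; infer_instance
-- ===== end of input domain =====

-- B replaces A's single streaming pass with two lazily-pruned deques by a classic
-- two-pointer merge over the extracted burger/person index lists (same cost, different algorithm).

-- ===== PORT A =====
-- A's inner `while q and q[0] < i-k: q.popleft()` loop
def pvDropStale : List Int → Int → List Int
  | [], _ => []
  | x :: xs, t => if x < t then pvDropStale xs t else x :: xs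

-- one iteration of A's `for i, e in enumerate(table)` body; state = (result, burgerq, peopleq)
def pvStepA (k : Int) (st : Int × List Int × List Int) (ie : Int × String) : Int × List Int × List Int :=
  let r := st.1; let bq := st.2.1; let pq := st.2.2
  let i := ie.1; let e := ie.2
  if e = "H" then
    match pvDropStale pq (i - k) with
    | _ :: rest => (r + 1, bq, rest)
    | [] => (r, bq ++ [i], [])
  else if e = "P" then
    match pvDropStale bq (i - k) with
    | _ :: rest => (r + 1, rest, pq)
    | [] => (r, [], pq ++ [i])
  else (r, bq, pq)

def allocate_max_burger (table : List String) (k : Int) : Int :=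
  ((PySem.List.enumerate table).foldl (pvStepA k) (0, [], [])).1

-- ===== PORT B =====
-- Source B's while loop over the pointers h, p, rendered as recursion on the two suffixes
-- hs[h:], ps[p:]; the fuel argument (total remaining length) only makes it structural.
def pvTwoPtrF (k : Int) : Nat → List Int → List Int → Int
  | _ + 1, h :: hs, p :: ps =>
    if |h - p| ≤ k then 1 + pvTwoPtrF k (hs.length + ps.length) hs ps
    else if h < p then pvTwoPtrF k (hs.length + (p :: ps).length) hs (p :: ps)
    else pvTwoPtrF k ((h :: hs).length + ps.length) (h :: hs) ps
  | _, _, _ => 0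

def pvTwoPtr (k : Int) (hs ps : List Int) : Int :=
  pvTwoPtrF k (hs.length + ps.length) hs ps

def allocate_max_burger_alt (table : List String) (k : Int) : Int :=
  let hs := ((PySem.List.enumerate table).filter (fun ie => ie.2 = "H")).map (·.1)
  let ps := ((PySem.List.enumerate table).filter (fun ie => ie.2 = "P")).map (·.1)
  pvTwoPtr k hs ps

-- ===== PRECONDITION & SPEC =====
def Spec_allocate_max_burger (table : List String) (k : Int) (out : Int) : Prop := out = allocate_max_burger_alt table k
instance (table : List String) (k : Int) (out : Int) : Decidable (Spec_allocate_max_burger table k out) := by unfold Spec_allocate_max_burger; infer_instance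

-- ===== CLAIM (what is proved, stated in full; the proofs are below) =====
def Claim_equal_allocate_max_burger : Prop := ∀ (table : List String) (k : Int), Dom_allocate_max_burger table k → Spec_allocate_max_burger table k (allocate_max_burger table k)

-- ===== LEMMAS AND PROOFS =====

def pvHIdx (rest : List (Int × String)) : List Int := (rest.filter (fun ie => ie.2 = "H")).map (·.1)
def pvPIdx (rest : List (Int × String)) : List Int := (rest.filter (fun ie => ie.2 = "P")).map (·.1)

lemma pvTwoPtr_nil_left (k : Int) (ps : List Int) : pvTwoPtr k [] ps = 0 := by
  cases ps <;> simp [pvTwoPtr, pvTwoPtrF]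

lemma pvTwoPtr_nil_right (k : Int) (hs : List Int) : pvTwoPtr k hs [] = 0 := by
  cases hs <;> simp [pvTwoPtr, pvTwoPtrF]

lemma pvTwoPtr_cons (k h p : Int) (hs ps : List Int) :
    pvTwoPtr k (h :: hs) (p :: ps) =
      if |h - p| ≤ k then 1 + pvTwoPtr k hs ps
      else if h < p then pvTwoPtr k hs (p :: ps)
      else pvTwoPtr k (h :: hs) ps := by
  show pvTwoPtrF k ((h :: hs).length + (p :: ps).length) (h :: hs) (p :: ps) = _
  rw [show (h :: hs).length + (p :: ps).length = (hs.length + ps.length + 1) + 1 by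
    simp [List.length_cons]; omega]
  simp only [pvTwoPtrF]
  rfl

lemma pvDropStale_subset : ∀ (l : List Int) (t x : Int), x ∈ pvDropStale l t → x ∈ l := by
  intro l
  induction l with
  | nil => intro t x hx; simp [pvDropStale] at hx
  | cons a l ih =>
    intro t x hx
    simp only [pvDropStale] at hx
    by_cases h : a < t
    · simp only [h, if_true] at hx
      exact List.mem_cons_of_mem _ (ih t x hx)
    · simp only [h, if_false] at hx
      exact hx

-- two-pointer steps through a queue of indices all < i exactly like A's stale-dropping
lemma pvTwoPtr_drop_left (k i : Int) (hs' : List Int) :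
    ∀ (pq rst : List Int), (∀ x ∈ pq, x < i) →
    pvTwoPtr k (i :: hs') (pq ++ rst) =
      (match pvDropStale pq (i - k) with
       | _ :: tl => 1 + pvTwoPtr k hs' (tl ++ rst)
       | [] => pvTwoPtr k (i :: hs') rst) := by
  intro pq
  induction pq with
  | nil => intro rst _; simp [pvDropStale]
  | cons p pq ih =>
    intro rst hlt
    have hp : p < i := hlt p (by simp)
    by_cases hst : p < i - k
    · have h1 : ¬ |i - p| ≤ k := by rw [abs_of_pos (by omega)]; omega
      have h2 : ¬ i < p := by omega
      rw [List.cons_append, pvTwoPtr_cons, if_neg h1, if_neg h2]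
      rw [ih rst (fun x hx => hlt x (List.mem_cons_of_mem _ hx))]
      simp [pvDropStale, hst]
    · have h1 : |i - p| ≤ k := by rw [abs_of_pos (by omega)]; omega
      rw [List.cons_append, pvTwoPtr_cons, if_pos h1]
      simp [pvDropStale, hst]

lemma pvTwoPtr_drop_right (k i : Int) (ps' : List Int) :
    ∀ (bq rst : List Int), (∀ x ∈ bq, x < i) →
    pvTwoPtr k (bq ++ rst) (i :: ps') =
      (match pvDropStale bq (i - k) with
       | _ :: tl => 1 + pvTwoPtr k (tl ++ rst) ps'
       | [] => pvTwoPtr k rst (i :: ps')) := by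
  intro bq
  induction bq with
  | nil => intro rst _; simp [pvDropStale]
  | cons b bq ih =>
    intro rst hlt
    have hb : b < i := hlt b (by simp)
    by_cases hst : b < i - k
    · have h1 : ¬ |b - i| ≤ k := by rw [abs_of_neg (by omega)]; omega
      have h2 : b < i := hb
      rw [List.cons_append, pvTwoPtr_cons, if_neg h1, if_pos h2]
      rw [ih rst (fun x hx => hlt x (List.mem_cons_of_mem _ hx))]
      simp [pvDropStale, hst]
    · have h1 : |b - i| ≤ k := by rw [abs_of_neg (by omega)]; omega
      rw [List.cons_append, pvTwoPtr_cons, if_pos h1]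
      simp [pvDropStale, hst]

lemma pvMain (k : Int) :
    ∀ (rest : List (Int × String)) (r : Int) (bq pq : List Int),
    (bq = [] ∨ pq = []) →
    (∀ x ∈ bq, ∀ j ∈ rest, x < j.1) →
    (∀ x ∈ pq, ∀ j ∈ rest, x < j.1) →
    rest.Pairwise (fun a b => a.1 < b.1) →
    (rest.foldl (pvStepA k) (r, bq, pq)).1 =
      r + pvTwoPtr k (bq ++ pvHIdx rest) (pq ++ pvPIdx rest) := by
  intro rest
  induction rest with
  | nil =>
    intro r bq pq hone _ _ _
    rcases hone with h | h <;> simp [h, pvHIdx, pvPIdx, pvTwoPtr_nil_left, pvTwoPtr_nil_right]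
  | cons ie rest' ih =>
    intro r bq pq hone hb hp hpw
    obtain ⟨i, e⟩ := ie
    rw [List.pairwise_cons] at hpw
    obtain ⟨hhead, hpw'⟩ := hpw
    have hb' : ∀ x ∈ bq, ∀ j ∈ rest', x < j.1 :=
      fun x hx j hj => hb x hx j (List.mem_cons_of_mem _ hj)
    have hp' : ∀ x ∈ pq, ∀ j ∈ rest', x < j.1 :=
      fun x hx j hj => hp x hx j (List.mem_cons_of_mem _ hj)
    have hbi : ∀ x ∈ bq, x < i := fun x hx => hb x hx (i, e) (by simp)
    have hpi : ∀ x ∈ pq, x < i := fun x hx => hp x hx (i, e) (by simp)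
    have hi' : ∀ j ∈ rest', i < j.1 := fun j hj => hhead j hj
    by_cases he : e = "H"
    · have hH : pvHIdx ((i, e) :: rest') = i :: pvHIdx rest' := by simp [pvHIdx, he]
      have hP : pvPIdx ((i, e) :: rest') = pvPIdx rest' := by simp [pvPIdx, he]
      rw [hH, hP]
      rcases hone with hbq | hpq
      · -- bq = []: use the drop lemma on pq
        subst hbq
        rw [List.nil_append, pvTwoPtr_drop_left k i (pvHIdx rest') pq (pvPIdx rest') hpi]
        rcases hdrop : pvDropStale pq (i - k) with _ | ⟨p0, tl⟩
        · -- queue exhausted: A appends i to burgerq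
          have hstep : pvStepA k (r, [], pq) (i, e) = (r, [i], []) := by
            simp [pvStepA, he, hdrop]
          rw [List.foldl_cons, hstep]
          have := ih r [i] [] (Or.inr rfl)
            (by intro x hx j hj; simp at hx; subst hx; exact hi' j hj)
            (by intro x hx; simp at hx) hpw'
          simpa using this
        · -- matched the front person
          have hstep : pvStepA k (r, [], pq) (i, e) = (r + 1, [], tl) := by
            simp [pvStepA, he, hdrop]
          rw [List.foldl_cons, hstep]
          have htl : ∀ x ∈ tl, ∀ j ∈ rest', x < j.1 := by
            intro x hx j hj
            exact hp' x (pvDropStale_subset pq (i - k) x (hdrop ▸ List.mem_cons_of_mem _ hx)) j hj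
          have := ih (r + 1) [] tl (Or.inl rfl) (by intro x hx; simp at hx) htl hpw'
          simp only [List.nil_append] at this ⊢
          rw [this]; ring
      · -- pq = []: A appends i to burgerq (no person waiting)
        subst hpq
        have hstep : pvStepA k (r, bq, []) (i, e) = (r, bq ++ [i], []) := by
          simp [pvStepA, he, pvDropStale]
        rw [List.foldl_cons, hstep]
        have := ih r (bq ++ [i]) [] (Or.inr rfl)
          (by intro x hx j hj
              rcases List.mem_append.mp hx with h | h
              · exact hb' x h j hj
              · simp at h; subst h; exact hi' j hj)
          (by intro x hx; simp at hx) hpw'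
        simpa [List.append_assoc] using this
    · by_cases hpe : e = "P"
      · have hH : pvHIdx ((i, e) :: rest') = pvHIdx rest' := by simp [pvHIdx, he]
        have hP : pvPIdx ((i, e) :: rest') = i :: pvPIdx rest' := by simp [pvPIdx, hpe]
        rw [hH, hP]
        rcases hone with hbq | hpq
        · -- bq = []: A appends i to peopleq
          subst hbq
          have hstep : pvStepA k (r, [], pq) (i, e) = (r, [], pq ++ [i]) := by
            simp [pvStepA, hpe, pvDropStale]
          rw [List.foldl_cons, hstep]
          have := ih r [] (pq ++ [i]) (Or.inl rfl)
            (by intro x hx; simp at hx)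
            (by intro x hx j hj
                rcases List.mem_append.mp hx with h | h
                · exact hp' x h j hj
                · simp at h; subst h; exact hi' j hj) hpw'
          simpa [List.append_assoc] using this
        · -- pq = []: use the drop lemma on bq
          subst hpq
          rw [List.nil_append, pvTwoPtr_drop_right k i (pvPIdx rest') bq (pvHIdx rest') hbi]
          rcases hdrop : pvDropStale bq (i - k) with _ | ⟨b0, tl⟩
          · have hstep : pvStepA k (r, bq, []) (i, e) = (r, [], [i]) := by
              simp [pvStepA, hpe, hdrop]
            rw [List.foldl_cons, hstep]
            have := ih r [] [i] (Or.inl rfl)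
              (by intro x hx; simp at hx)
              (by intro x hx j hj; simp at hx; subst hx; exact hi' j hj) hpw'
            simpa using this
          · have hstep : pvStepA k (r, bq, []) (i, e) = (r + 1, tl, []) := by
              simp [pvStepA, hpe, hdrop]
            rw [List.foldl_cons, hstep]
            have htl : ∀ x ∈ tl, ∀ j ∈ rest', x < j.1 := by
              intro x hx j hj
              exact hb' x (pvDropStale_subset bq (i - k) x (hdrop ▸ List.mem_cons_of_mem _ hx)) j hj
            have := ih (r + 1) tl [] (Or.inr rfl) htl (by intro x hx; simp at hx) hpw'
            simp only [List.nil_append] at this ⊢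
            rw [this]; ring
      · -- neither 'H' nor 'P': state and index lists unchanged
        have hH : pvHIdx ((i, e) :: rest') = pvHIdx rest' := by simp [pvHIdx, he]
        have hP : pvPIdx ((i, e) :: rest') = pvPIdx rest' := by simp [pvPIdx, hpe]
        have hstep : pvStepA k (r, bq, pq) (i, e) = (r, bq, pq) := by
          simp [pvStepA, he, hpe]
        rw [hH, hP, List.foldl_cons, hstep]
        exact ih r bq pq hone hb' hp' hpw'

-- ===== VERDICT (by name: the statement is the Claim_ definition above) =====
theorem allocate_max_burger_spec : Claim_equal_allocate_max_burger := by
  intro table k _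
  unfold Spec_allocate_max_burger allocate_max_burger allocate_max_burger_alt
  have := pvMain k (PySem.List.enumerate table) 0 [] []
    (Or.inl rfl) (by simp) (by simp) (PySem.List.pairwise_lt_enumerate table 0)
  simpa [pvHIdx, pvPIdx] using this
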